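-- pv_equiv track=rewrite | github.com/ritamerhi/Revenge-of-The-Fallen | project_A.py | determine_triangle_structure
-- ===== SOURCE A (Python) =====
-- def determine_triangle_structure(num_blocks):
--     """
--     Calculate the optimal number of rows and block distribution
--     for a perfect triangle where the top has the fewest blocks, and each row below
--     increases until the base. All blocks must be taken into account.
--     """
--     rows = 0
--     total_blocks = 0
--     row_distributions = []
--
--     # Determine the maximum possible rows while taking all blocks into account
--     while total_blocks + (2 * rows + 1) <= num_blocks:
--         current_row_blocks = 2 * rows + 1
--         row_distributions.append((rows, current_row_blocks))
--         total_blocks += current_row_blocks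
--         rows += 1
--
--     # Redistribute any remaining blocks to maintain a triangular structure
--     remaining_blocks = num_blocks - total_blocks
--     for i in range(remaining_blocks):
--         row_distributions[i % len(row_distributions)] = (
--             row_distributions[i % len(row_distributions)][0],
--             row_distributions[i % len(row_distributions)][1] + 1
--         )
--
--     return rows, row_distributions
-- ===== SOURCE B (Python) =====
-- def determine_triangle_structure(num_blocks):
--     if num_blocks < 1:
--         return 0, []
--     # binary search for rows = isqrt(num_blocks): invariant lo*lo <= num_blocks < hi*hi
--     lo, hi = 0, num_blocks + 1
--     while hi - lo > 1:
--         mid = (lo + hi) // 2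
--         if mid * mid <= num_blocks:
--             lo = mid
--         else:
--             hi = mid
--     rows = lo
--     remaining = num_blocks - rows * rows
--     q, s = remaining // rows, remaining % rows
--     return rows, [(i, 2 * i + 1 + q + (1 if i < s else 0)) for i in range(rows)]
-- ===== Notes on version B (the rewrite author's own statement) =====
-- stated objective: alternative
-- what changed: Replaces A's O(sqrt n) row-growing while-loop and its one-by-one cyclic redistribution loop with a binary search for isqrt(n) plus a closed-form quotient/remainder split built in a single comprehension.
import Mathlib
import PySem

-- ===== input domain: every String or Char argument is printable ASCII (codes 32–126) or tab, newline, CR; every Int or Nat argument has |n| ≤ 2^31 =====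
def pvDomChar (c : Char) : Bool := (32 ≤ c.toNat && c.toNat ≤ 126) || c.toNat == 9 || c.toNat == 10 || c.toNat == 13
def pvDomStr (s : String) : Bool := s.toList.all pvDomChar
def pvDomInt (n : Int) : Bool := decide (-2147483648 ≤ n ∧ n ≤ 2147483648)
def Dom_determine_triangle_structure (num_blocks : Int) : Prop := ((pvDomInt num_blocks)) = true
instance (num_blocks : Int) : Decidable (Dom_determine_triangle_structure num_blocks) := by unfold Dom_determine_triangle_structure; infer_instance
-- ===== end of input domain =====

-- B replaces A's O(√n) row-growing while-loop and one-by-one cyclic redistribution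
-- by a binary search for isqrt(n) and a closed-form quotient/remainder split (alternative algorithm).

-- ===== PORT A =====
-- the while-loop: state (rows, total_blocks, row_distributions); rows carried as Nat (it starts at 0
-- and only increments) so the loop measure (num_blocks - total) decreases; values appended are Int-cast.
def pvLoopA (n : Int) (rows : Nat) (total : Int) (acc : List (Int × Int)) :
    Nat × Int × List (Int × Int) :=
  if total + (2 * (rows : Int) + 1) ≤ n then
    pvLoopA n (rows + 1) (total + (2 * (rows : Int) + 1)) (acc ++ [((rows : Int), 2 * (rows : Int) + 1)])
  else
    (rows, total, acc)
termination_by (n - total).toNat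
decreasing_by omega

-- one step of the redistribution loop: row_distributions[i % len] gets +1 on its second component
-- (the none branch is unreachable: the loop only runs when the list is nonempty)
def pvRedistStep (d : List (Int × Int)) (i : Int) : List (Int × Int) :=
  let k := (PySem.Int.mod i (d.length : Int)).toNat
  match d[k]? with
  | some p => d.set k (p.1, p.2 + 1)
  | none => d

def determine_triangle_structure (num_blocks : Int) : Int × (List (Int × Int)) :=
  let st := pvLoopA num_blocks 0 0 []
  let rows := st.1
  let total := st.2.1
  let dist := st.2.2
  let remaining := num_blocks - total
  ((rows : Int), (PySem.List.pyRange 0 remaining 1).foldl pvRedistStep dist)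

-- ===== PORT B =====
-- binary search maintaining lo*lo ≤ n < hi*hi
def pvBsearch (n lo hi : Int) : Int :=
  if hi - lo > 1 then
    let mid := PySem.Int.floordiv (lo + hi) 2
    if mid * mid ≤ n then pvBsearch n mid hi else pvBsearch n lo mid
  else lo
termination_by (hi - lo).toNat
decreasing_by
  all_goals
    simp only [PySem.Int.floordiv_eq_ediv_of_pos (show (0:Int) < 2 by norm_num)] at *
    omega

def determine_triangle_structure_alt (num_blocks : Int) : Int × (List (Int × Int)) :=
  if num_blocks < 1 then (0, [])
  else
    let rows := pvBsearch num_blocks 0 (num_blocks + 1)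
    let remaining := num_blocks - rows * rows
    let q := PySem.Int.floordiv remaining rows
    let s := PySem.Int.mod remaining rows
    (rows, (PySem.List.pyRange 0 rows 1).map
      (fun i => (i, 2 * i + 1 + q + (if i < s then 1 else 0))))

-- ===== PRECONDITION & SPEC =====
def Spec_determine_triangle_structure (num_blocks : Int) (out : Int × (List (Int × Int))) : Prop := out = determine_triangle_structure_alt num_blocks
instance (num_blocks : Int) (out : Int × (List (Int × Int))) : Decidable (Spec_determine_triangle_structure num_blocks out) := by unfold Spec_determine_triangle_structure; infer_instance

-- ===== CLAIM (what is proved, stated in full; the proofs are below) =====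
def Claim_equal_determine_triangle_structure : Prop := ∀ (num_blocks : Int), Dom_determine_triangle_structure num_blocks → Spec_determine_triangle_structure num_blocks (determine_triangle_structure num_blocks)

-- ===== LEMMAS AND PROOFS =====

-- the list A's while-loop has built after `r` iterations
def pvBase (r : Nat) : List (Int × Int) :=
  (List.range r).map (fun (k : Nat) => ((k : Int), 2 * (k : Int) + 1))

-- the list after `t` steps of the cyclic redistribution over `r` rows
def pvMapT (r t : Nat) : List (Int × Int) :=
  (List.range r).map (fun (k : Nat) =>
    ((k : Int), 2 * (k : Int) + 1 + ((t / r : Nat) : Int) + (if k < t % r then (1 : Int) else 0)))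

lemma pv_divmod_succ_lt (t r : Nat) (hr : 0 < r) (h : t % r + 1 < r) :
    (t + 1) / r = t / r ∧ (t + 1) % r = t % r + 1 := by
  have e : t + 1 = (t % r + 1) + r * (t / r) := by have := Nat.div_add_mod t r; omega
  rw [e, Nat.add_mul_div_left _ _ hr, Nat.add_mul_mod_self_left,
    Nat.div_eq_of_lt h, Nat.mod_eq_of_lt h]
  omega

lemma pv_divmod_succ_eq (t r : Nat) (hr : 0 < r) (h : t % r + 1 = r) :
    (t + 1) / r = t / r + 1 ∧ (t + 1) % r = 0 := by
  have e : t + 1 = r * (t / r + 1) := by rw [Nat.mul_succ]; have := Nat.div_add_mod t r; omega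
  rw [e, Nat.mul_mod_right, Nat.mul_div_cancel_left _ hr]
  omega

-- an integer a with a*a ≤ n < (a+1)*(a+1) is (the cast of) Nat.sqrt n.toNat
lemma pv_sqrt_eq (n a : Int) (h0 : 0 ≤ a) (h1 : a * a ≤ n) (h2 : n < (a + 1) * (a + 1)) :
    a = (Nat.sqrt n.toNat : Int) := by
  have hn : 0 ≤ n := le_trans (mul_nonneg h0 h0) h1
  have hak : a = (a.toNat : Int) := by omega
  have hnn : ((n.toNat : Nat) : Int) = n := Int.toNat_of_nonneg hn
  have hm1 : a.toNat * a.toNat ≤ n.toNat := by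
    rw [hak] at h1; rw [← hnn] at h1; exact_mod_cast h1
  have hm2 : n.toNat < (a.toNat + 1) * (a.toNat + 1) := by
    rw [hak] at h2; rw [← hnn] at h2; exact_mod_cast h2
  have hle : a.toNat ≤ Nat.sqrt n.toNat := Nat.le_sqrt.mpr hm1
  have hlt : Nat.sqrt n.toNat < a.toNat + 1 := Nat.sqrt_lt.mpr hm2
  omega

lemma pv_loopA_eq (n : Int) : ∀ (k r : Nat), n.toNat + 1 - r ≤ k → (r : Int) * (r : Int) ≤ n →
    pvLoopA n r ((r : Int) * (r : Int)) (pvBase r) =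
      (Nat.sqrt n.toNat,
       ((Nat.sqrt n.toNat : Int) * (Nat.sqrt n.toNat : Int), pvBase (Nat.sqrt n.toNat))) := by
  intro k
  induction k with
  | zero =>
    intro r hk hle
    exfalso
    rcases Nat.eq_zero_or_pos r with h | h
    · omega
    · have h1 : (1 : Int) ≤ (r : Int) := by exact_mod_cast h
      have h2 : (r : Int) ≤ n := le_trans (by nlinarith) hle
      omega
  | succ k ih =>
    intro r hk hle
    rw [pvLoopA]
    split
    case isTrue h =>
      have hstep : (r : Int) * r + (2 * (r : Int) + 1) = ((r + 1 : Nat) : Int) * ((r + 1 : Nat) : Int) := by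
        push_cast; ring
      have hacc : pvBase r ++ [((r : Int), 2 * (r : Int) + 1)] = pvBase (r + 1) := by
        simp [pvBase, List.range_succ]
      rw [hstep, hacc]
      have hrn : (r : Int) + 1 ≤ n := by nlinarith
      apply ih
      · omega
      · push_cast; nlinarith
    case isFalse h =>
      have hsq := pv_sqrt_eq n r (by positivity) hle (by nlinarith [not_le.mp h])
      have hr : r = Nat.sqrt n.toNat := by exact_mod_cast hsq
      rw [← hr]

lemma pv_bsearch_eq (n : Int) : ∀ (k : Nat) (lo hi : Int), (hi - lo).toNat ≤ k → 0 ≤ lo →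
    lo < hi → lo * lo ≤ n → n < hi * hi → pvBsearch n lo hi = (Nat.sqrt n.toNat : Int) := by
  intro k
  induction k with
  | zero => intro lo hi hk _ hlt _ _; exfalso; omega
  | succ k ih =>
    intro lo hi hk h0 hlt hlo hhi
    rw [pvBsearch]
    by_cases hgt : hi - lo > 1
    · rw [if_pos hgt]
      show (if PySem.Int.floordiv (lo + hi) 2 * PySem.Int.floordiv (lo + hi) 2 ≤ n then
          pvBsearch n (PySem.Int.floordiv (lo + hi) 2) hi
        else pvBsearch n lo (PySem.Int.floordiv (lo + hi) 2)) = (Nat.sqrt n.toNat : Int)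
      rw [PySem.Int.floordiv_eq_ediv_of_pos (by norm_num)]
      have hb1 : lo < (lo + hi) / 2 := by omega
      have hb2 : (lo + hi) / 2 < hi := by omega
      by_cases h2 : (lo + hi) / 2 * ((lo + hi) / 2) ≤ n
      · rw [if_pos h2]
        exact ih _ _ (by omega) (by omega) hb2 h2 hhi
      · rw [if_neg h2]
        exact ih _ _ (by omega) h0 hb1 hlo (not_le.mp h2)
    · rw [if_neg hgt]
      have h1 : hi = lo + 1 := by omega
      subst h1
      exact pv_sqrt_eq n lo h0 hlo hhi

lemma pv_pyRange_nonpos (n : Int) (h : n ≤ 0) : PySem.List.pyRange 0 n 1 = [] := by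
  simp [PySem.List.pyRange]; omega

lemma pv_redist_eq (r : Nat) (hr : 0 < r) : ∀ (t : Nat),
    (PySem.List.pyRange 0 (t : Int) 1).foldl pvRedistStep (pvBase r) = pvMapT r t := by
  intro t
  induction t with
  | zero =>
    rw [show ((0 : Nat) : Int) = 0 from rfl, pv_pyRange_nonpos 0 le_rfl]
    unfold pvBase pvMapT
    simp
  | succ t ih =>
    have hrange : PySem.List.pyRange 0 ((t + 1 : Nat) : Int) 1 =
        PySem.List.pyRange 0 (t : Int) 1 ++ [(t : Int)] := by
      push_cast
      rw [PySem.List.pyRange_one_succ_right] <;> omega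
    rw [hrange, List.foldl_append]
    simp only [List.foldl]
    rw [ih]
    have hlen : (pvMapT r t).length = r := by simp [pvMapT]
    have hbr : t % r < r := Nat.mod_lt _ hr
    have helem : (pvMapT r t)[t % r]? =
        some (((t % r : Nat) : Int),
          2 * ((t % r : Nat) : Int) + 1 + ((t / r : Nat) : Int)) := by
      rw [List.getElem?_eq_getElem (by omega)]
      simp [pvMapT]
    have hstep : pvRedistStep (pvMapT r t) (t : Int) =
        (pvMapT r t).set (t % r)
          (((t % r : Nat) : Int),
           2 * ((t % r : Nat) : Int) + 1 + ((t / r : Nat) : Int) + 1) := by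
      unfold pvRedistStep
      simp only [hlen, PySem.Int.mod_natCast, Int.toNat_natCast, helem]
    rw [hstep]
    apply List.ext_getElem
    · simp [pvMapT]
    · intro i h1 h2
      have hir : i < r := by simpa [pvMapT] using h2
      rcases Nat.lt_or_ge (t % r + 1) r with hc | hc
      · obtain ⟨hd, hm⟩ := pv_divmod_succ_lt t r hr hc
        simp only [pvMapT, List.getElem_set, List.getElem_map, List.getElem_range, hd, hm]
        split_ifs <;> (refine Prod.ext ?_ ?_ <;> simp <;> omega)
      · have hc' : t % r + 1 = r := by omega
        obtain ⟨hd, hm⟩ := pv_divmod_succ_eq t r hr hc'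
        simp only [pvMapT, List.getElem_set, List.getElem_map, List.getElem_range, hd, hm]
        split_ifs <;> (refine Prod.ext ?_ ?_ <;> simp <;> omega)

-- ===== VERDICT (by name: the statement is the Claim_ definition above) =====
theorem determine_triangle_structure_spec : Claim_equal_determine_triangle_structure := by
  intro n _
  unfold Spec_determine_triangle_structure
  by_cases hn : n < 1
  · have hA : determine_triangle_structure n = (0, []) := by
      unfold determine_triangle_structure
      rw [pvLoopA, if_neg (by push_cast; omega)]
      simp [pv_pyRange_nonpos n (by omega)]
    rw [hA]
    unfold determine_triangle_structure_alt
    rw [if_pos hn]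
  · have hn1 : 1 ≤ n := not_lt.mp hn
    set RN := Nat.sqrt n.toNat with hRN
    have hpos : 0 < RN := by rw [hRN]; exact Nat.sqrt_pos.mpr (by omega)
    have hnn : ((n.toNat : Nat) : Int) = n := Int.toNat_of_nonneg (by omega)
    have hR2 : (RN : Int) * RN ≤ n := by
      have h1 : RN * RN ≤ n.toNat := by
        have := Nat.sqrt_le' n.toNat
        simpa [pow_two] using this
      rw [← hnn]; exact_mod_cast h1
    have hR2' : n < ((RN : Int) + 1) * ((RN : Int) + 1) := by
      have h1 : n.toNat < (RN + 1) * (RN + 1) := by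
        have := Nat.lt_succ_sqrt' n.toNat
        simpa [pow_two, Nat.succ_eq_add_one] using this
      rw [← hnn]; exact_mod_cast h1
    set t := (n - (RN : Int) * RN).toNat with ht
    have htc : ((t : Nat) : Int) = n - (RN : Int) * RN := by rw [ht]; omega
    have hloop := pv_loopA_eq n (n.toNat + 1) 0 (by omega) (by push_cast; omega)
    have hb0 : pvBase 0 = [] := by simp [pvBase]
    simp only [Nat.cast_zero, mul_zero, hb0] at hloop
    have hA : determine_triangle_structure n = ((RN : Int), pvMapT RN t) := by
      unfold determine_triangle_structure
      show (((pvLoopA n 0 0 []).1 : Int),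
          List.foldl pvRedistStep (pvLoopA n 0 0 []).2.2
            (PySem.List.pyRange 0 (n - (pvLoopA n 0 0 []).2.1) 1)) = ((RN : Int), pvMapT RN t)
      rw [hloop]
      show ((RN : Int),
          List.foldl pvRedistStep (pvBase RN)
            (PySem.List.pyRange 0 (n - (RN : Int) * RN) 1)) = ((RN : Int), pvMapT RN t)
      rw [← htc, pv_redist_eq RN hpos t]
    have hbs : pvBsearch n 0 (n + 1) = (RN : Int) :=
      pv_bsearch_eq n (n + 1).toNat 0 (n + 1) (by omega) le_rfl (by omega)
        (by simpa using (by omega : (0 : Int) ≤ n)) (by nlinarith)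
    have hB : determine_triangle_structure_alt n = ((RN : Int), pvMapT RN t) := by
      unfold determine_triangle_structure_alt
      rw [if_neg hn]
      show ((pvBsearch n 0 (n + 1)),
          (PySem.List.pyRange 0 (pvBsearch n 0 (n + 1)) 1).map
            (fun i => (i, 2 * i + 1
              + PySem.Int.floordiv (n - pvBsearch n 0 (n + 1) * pvBsearch n 0 (n + 1))
                  (pvBsearch n 0 (n + 1))
              + (if i < PySem.Int.mod (n - pvBsearch n 0 (n + 1) * pvBsearch n 0 (n + 1))
                    (pvBsearch n 0 (n + 1)) then 1 else 0)))) = ((RN : Int), pvMapT RN t)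
      rw [hbs, ← htc, PySem.Int.floordiv_natCast, PySem.Int.mod_natCast,
        PySem.List.pyRange_zero_natCast]
      refine congrArg _ ?_
      rw [List.map_map]
      unfold pvMapT
      apply List.map_congr_left
      intro k hk
      simp only [Function.comp_apply, Nat.cast_lt]
    rw [hA, hB]
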